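-- pv_equiv track=rewrite | github.com/nevstas/True-SQL-Injection-Scanner | core_hack.py | inj_links
-- ===== SOURCE A (Python) =====
-- def inj_links(links):
-- 	get_par_to_do = []
-- 	links_inj = []
-- 	for lnk in links:
-- 		result1 = lnk.split("?")
-- 		if len(result1) == 1:
-- 			continue
-- 		params = result1[1].split("&")
-- 		for par in params:
-- 			p = par.split("=");
-- 			get_par_to_do.append(p[0])
-- 	get_par_to_do = list(set(get_par_to_do)) #remove dupl
-- 	for lnk in links:
-- 		result1 = lnk.split("?")
-- 		if len(result1) == 1:
-- 			continue
-- 		params = result1[1].split("&")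
-- 		for par in params:
-- 			p = par.split("=");
-- 			if len(p) == 1:
-- 				continue
-- 			if p[0] in get_par_to_do:
-- 				lnk = lnk.replace(p[0] + '=' + p[1], p[0] + '=' + p[1] + "'")
-- 				links_inj.append(lnk)
-- 				get_par_to_do.remove(p[0])
-- 				break
--
-- 	return links_inj[:100]
-- ===== SOURCE B (Python) =====
-- def inj_links(links):
-- 	def first_hit(lnk, used):
-- 		# first parameter with a value whose name is not yet used, or None
-- 		qs = lnk.split("?")
-- 		if len(qs) < 2:
-- 			return None
-- 		for par in qs[1].split("&"):
-- 			p = par.split("=")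
-- 			if len(p) >= 2 and p[0] not in used:
-- 				tgt = p[0] + "=" + p[1]
-- 				return p[0], lnk.replace(tgt, tgt + "'")
-- 		return None
--
-- 	out = []
-- 	used = set()
-- 	for lnk in links:
-- 		hit = first_hit(lnk, used)
-- 		if hit is not None:
-- 			used.add(hit[0])
-- 			out.append(hit[1])
-- 	return out[:100]
-- ===== Notes on version B (the rewrite author's own statement) =====
-- stated objective: simpler
-- what changed: Replaces A's two staged passes (collect every parameter name, deduplicate via list(set(...)), then scan again removing names as they are used) with a single pass using a helper that returns the first injectable (name, link) pair per link and a grow-only 'used' set, so the name-gathering pass and the remove-on-use bookkeeping disappear.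
import Mathlib
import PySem

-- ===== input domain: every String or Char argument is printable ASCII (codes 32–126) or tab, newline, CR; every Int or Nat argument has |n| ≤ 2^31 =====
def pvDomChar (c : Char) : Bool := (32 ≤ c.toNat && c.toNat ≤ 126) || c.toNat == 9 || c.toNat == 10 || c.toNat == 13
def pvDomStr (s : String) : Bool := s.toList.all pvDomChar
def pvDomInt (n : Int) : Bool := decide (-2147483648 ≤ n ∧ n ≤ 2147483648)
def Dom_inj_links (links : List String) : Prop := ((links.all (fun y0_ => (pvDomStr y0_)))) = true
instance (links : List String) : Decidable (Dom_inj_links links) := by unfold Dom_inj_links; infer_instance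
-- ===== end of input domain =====

-- B replaces A's two staged passes (collect all names, list(set(...)) dedup, rescan removing
-- names as used) by one pass: a helper returns the first injectable (name, link) pair of each
-- link against a grow-only `used` set. Objective: simpler.
-- (A's value never depends on the CPython set iteration order: only membership in the set is used.)

-- s.split(sep) for a nonempty literal sep (split? is none only for sep = "")
def pvSplit (s sep : String) : List String := (PySem.Str.split? s sep).getD []

-- ===== PORT A =====
-- A-side expression helpers (each is one Python expression appearing verbatim in A)
-- p[0] for p = par.split("=")  (split never returns [], so the default is unreachable)
def pvFirst (par : String) : String := (PySem.List.pyGet? (pvSplit par "=") 0).getD ""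
-- p[1] for p = par.split("=")  (used only under len(p) != 1)
def pvSecond (par : String) : String := (PySem.List.pyGet? (pvSplit par "=") 1).getD ""
-- result1[1].split("&") for result1 = lnk.split("?")  (used only under len(result1) != 1)
def pvQuery (lnk : String) : List String :=
  pvSplit ((PySem.List.pyGet? (pvSplit lnk "?") 1).getD "") "&"

-- first pass: for each link with a query string, append every parameter name
def injA_pass1 (links : List String) : List String :=
  links.foldl (fun acc lnk =>
    if (pvSplit lnk "?").length == 1 then acc
    else (pvQuery lnk).foldl (fun acc par => acc ++ [pvFirst par]) acc) []

-- inner loop of the second pass (breaks after the first injected parameter)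
def injA_inner (lnk : String) (S acc : List String) : List String → List String × List String
  | [] => (S, acc)
  | par :: rest =>
    if (pvSplit par "=").length == 1 then injA_inner lnk S acc rest
    else if S.contains (pvFirst par) then
      ((PySem.List.remove? S (pvFirst par)).getD S,
       acc ++ [PySem.Str.replace lnk (pvFirst par ++ "=" ++ pvSecond par)
                (pvFirst par ++ "=" ++ pvSecond par ++ "'")])
    else injA_inner lnk S acc rest

def injA_pass2 (S acc : List String) : List String → List String × List String
  | [] => (S, acc)
  | lnk :: rest =>
    if (pvSplit lnk "?").length == 1 then injA_pass2 S acc rest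
    else
      let st := injA_inner lnk S acc (pvQuery lnk)
      injA_pass2 st.1 st.2 rest

def inj_links (links : List String) : List String :=
  PySem.List.slice (injA_pass2 (PySem.Set.ofList (injA_pass1 links)) [] links).2 none (some 100)

-- ===== PORT B =====
-- loop of first_hit: first param with a value whose name is not in `used`, as (name, new link)
def injB_find (lnk : String) (used : PySem.Set String) : List String → Option (String × String)
  | [] => none
  | par :: rest =>
    match pvSplit par "=" with
    | p0 :: p1 :: _ =>
      if PySem.Set.contains used p0 then injB_find lnk used rest
      else some (p0, PySem.Str.replace lnk (p0 ++ "=" ++ p1) (p0 ++ "=" ++ p1 ++ "'"))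
    | _ => injB_find lnk used rest

-- first_hit(lnk, used): None when the link has no query string
def injB_hit (used : PySem.Set String) (lnk : String) : Option (String × String) :=
  match pvSplit lnk "?" with
  | _ :: q :: _ => injB_find lnk used (pvSplit q "&")
  | _ => none

-- the single pass over the links
def injB_go (used : PySem.Set String) : List String → List String
  | [] => []
  | lnk :: rest =>
    match injB_hit used lnk with
    | some hit => hit.2 :: injB_go (PySem.Set.add used hit.1) rest
    | none => injB_go used rest

def inj_links_alt (links : List String) : List String :=
  PySem.List.slice (injB_go PySem.Set.empty links) none (some 100)

-- ===== PRECONDITION & SPEC =====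
def Spec_inj_links (links : List String) (out : List String) : Prop := out = inj_links_alt links
instance (links : List String) (out : List String) : Decidable (Spec_inj_links links out) := by unfold Spec_inj_links; infer_instance

-- ===== CLAIM =====
def Claim_equal_inj_links : Prop := ∀ (links : List String), Dom_inj_links links → Spec_inj_links links (inj_links links)

-- ===== LEMMAS AND PROOFS =====

-- str.split with a nonempty separator never yields the empty list
theorem splitOn_go_ne_nil (sep : List Char) (fuel : Nat) (l cur : List Char)
    (acc : List (List Char)) : PySem.Chars.splitOn.go sep fuel l cur acc ≠ [] := by
  induction fuel generalizing l cur acc with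
  | zero => simp [PySem.Chars.splitOn.go]
  | succ n ih =>
    cases l with
    | nil => simp [PySem.Chars.splitOn.go]
    | cons c rest =>
      rw [PySem.Chars.splitOn.go]
      split
      · exact ih _ _ _
      · exact ih _ _ _

theorem pvSplit_ne_nil (s sep : String) (h : sep.toList ≠ []) : pvSplit s sep ≠ [] := by
  unfold pvSplit PySem.Str.split? PySem.Chars.split?
  rw [if_neg (by simpa using h)]
  simp only [Option.map_some, Option.getD_some, ne_eq, List.map_eq_nil_iff]
  exact splitOn_go_ne_nil _ _ _ _ _

-- invariant tying A's to-do list S to B's used set: S holds exactly the names of `allN` not yet used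
def pvInv (S : List String) (used : PySem.Set String) (allN : List String) : Prop :=
  S.Nodup ∧ ∀ x, x ∈ S ↔ x ∈ allN ∧ x ∉ used

-- the name-gathering inner fold only grows the accumulator
theorem gather_mono (ps : List String) (a : List String) (x : String) (hx : x ∈ a) :
    x ∈ ps.foldl (fun acc par => acc ++ [pvFirst par]) a := by
  induction ps generalizing a with
  | nil => exact hx
  | cons p pr ih => exact ih _ (by simp [hx])

-- the name-gathering inner fold picks up every parameter's name
theorem gather_mem (ps : List String) (par : String) (hp : par ∈ ps) (a : List String) :
    pvFirst par ∈ ps.foldl (fun acc par => acc ++ [pvFirst par]) a := by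
  induction ps generalizing a with
  | nil => cases hp
  | cons q qs ih =>
    rcases List.mem_cons.1 hp with h | h
    · subst h
      exact gather_mono qs _ _ (by simp)
    · exact ih h _

-- A's first pass only grows the accumulator
theorem pass1_mono (links : List String) (acc : List String) (x : String) (hx : x ∈ acc) :
    x ∈ links.foldl (fun acc lnk =>
      if (pvSplit lnk "?").length == 1 then acc
      else (pvQuery lnk).foldl (fun acc par => acc ++ [pvFirst par]) acc) acc := by
  induction links generalizing acc with
  | nil => exact hx
  | cons l ls ih =>
    simp only [List.foldl]
    apply ih
    split
    · exact hx
    · exact gather_mono _ _ _ hx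

-- every parameter name of every link with a query ends up in A's first pass
theorem mem_pass1 (links : List String) (lnk : String) (hl : lnk ∈ links)
    (hq : ¬ (pvSplit lnk "?").length = 1) (par : String) (hp : par ∈ pvQuery lnk) :
    pvFirst par ∈ injA_pass1 links := by
  have main : ∀ (ls : List String) (a : List String), lnk ∈ ls →
      pvFirst par ∈ ls.foldl (fun acc lnk =>
        if (pvSplit lnk "?").length == 1 then acc
        else (pvQuery lnk).foldl (fun acc par => acc ++ [pvFirst par]) acc) a := by
    intro ls
    induction ls with
    | nil => intro a h; cases h
    | cons l rest ih =>
      intro a h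
      simp only [List.foldl]
      rcases List.mem_cons.1 h with h | h
      · subst h
        apply pass1_mono
        rw [if_neg (by simpa using hq)]
        exact gather_mem _ _ hp _
      · exact ih _ h
  exact main links [] hl

-- A's break-at-first-hit inner loop, characterised by B's first_hit result
theorem inner_eq (params : List String) (lnk : String) (S acc : List String)
    (used : PySem.Set String) (allN : List String)
    (hInv : pvInv S used allN) (hN : ∀ par ∈ params, pvFirst par ∈ allN) :
    (injB_find lnk used params = none → injA_inner lnk S acc params = (S, acc)) ∧
    (∀ n s, injB_find lnk used params = some (n, s) →
      injA_inner lnk S acc params = ((PySem.List.remove? S n).getD S, acc ++ [s]) ∧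
      pvInv ((PySem.List.remove? S n).getD S) (PySem.Set.add used n) allN) := by
  induction params generalizing acc with
  | nil => exact ⟨fun _ => rfl, fun n s h => by cases h⟩
  | cons par rest ih =>
    obtain ⟨hnd, hmem⟩ := hInv
    have hN' : ∀ p ∈ rest, pvFirst p ∈ allN := fun p hp => hN p (by simp [hp])
    have hne : pvSplit par "=" ≠ [] := pvSplit_ne_nil par "=" (by decide)
    match hsp : pvSplit par "=" with
    | [] => exact absurd hsp hne
    | [p0] =>
      -- no value: both skip
      simp only [injA_inner, injB_find, hsp]
      exact ih acc hN'
    | p0 :: p1 :: tl =>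
      have hf : pvFirst par = p0 := by
        have h0 : (0:Int) ≤ (tl.length:Int) + 1 := by positivity
        simp [pvFirst, hsp, PySem.List.pyGet?, PySem.List.pyIdx?, h0]
      have hs : pvSecond par = p1 := by
        simp [pvSecond, hsp, PySem.List.pyGet?, PySem.List.pyIdx?]
      have hpar : p0 ∈ allN := hf ▸ hN par (by simp)
      simp only [injA_inner, injB_find, hsp, hf, hs]
      by_cases hu : PySem.Set.contains used p0
      · -- already used: A's S does not contain the name, both skip
        have hSm : p0 ∉ S := by
          intro hm
          exact ((hmem _).1 hm).2 ((PySem.Set.contains_iff _ _).1 hu)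
        have hSc : S.contains p0 = false := by simpa using hSm
        simp only [hu, hSc, if_true, Bool.false_eq_true, if_false]
        exact ih acc hN'
      · -- fresh name: A injects too
        have hused : p0 ∉ used := fun h => hu ((PySem.Set.contains_iff _ _).2 h)
        have hSm : p0 ∈ S := (hmem _).2 ⟨hpar, hused⟩
        have hSc : S.contains p0 = true := by simpa using hSm
        rw [if_neg hu, hSc, if_pos rfl]
        refine ⟨(fun h => by cases h), fun n s h => ?_⟩
        simp only [Option.some_inj, Prod.mk.injEq] at h
        obtain ⟨rfl, rfl⟩ := h
        refine ⟨rfl, ?_, ?_⟩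
        · rw [PySem.List.remove?_eq_some_erase S p0 hSm]
          exact hnd.erase _
        · intro x
          rw [PySem.List.remove?_eq_some_erase S p0 hSm]
          simp only [Option.getD_some]
          rw [hnd.mem_erase_iff]
          constructor
          · rintro ⟨hxne, hxS⟩
            obtain ⟨hA, hU⟩ := (hmem x).1 hxS
            refine ⟨hA, ?_⟩
            rw [PySem.Set.mem_add]
            rintro (h | h)
            · exact hU h
            · exact hxne h
          · rintro ⟨hA, hU⟩
            have hxne : x ≠ p0 := by
              intro h; exact hU (by simp [PySem.Set.mem_add, h])
            have hxU : x ∉ used := fun h => hU (by simp [PySem.Set.mem_add, h])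
            exact ⟨hxne, (hmem x).2 ⟨hA, hxU⟩⟩

-- the staged second pass equals B's single pass, appended to the accumulator
theorem loop_eq (links : List String) (S acc : List String) (used : PySem.Set String)
    (allN : List String) (hInv : pvInv S used allN)
    (hN : ∀ lnk ∈ links, ¬ (pvSplit lnk "?").length = 1 →
          ∀ par ∈ pvQuery lnk, pvFirst par ∈ allN) :
    (injA_pass2 S acc links).2 = acc ++ injB_go used links := by
  induction links generalizing S acc used with
  | nil => simp [injA_pass2, injB_go]
  | cons lnk rest ih =>
    have hN' : ∀ l ∈ rest, ¬ (pvSplit l "?").length = 1 →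
        ∀ par ∈ pvQuery l, pvFirst par ∈ allN := fun l hl => hN l (by simp [hl])
    have hqs : pvSplit lnk "?" ≠ [] := pvSplit_ne_nil lnk "?" (by decide)
    match hq : pvSplit lnk "?" with
    | [] => exact absurd hq hqs
    | [q0] =>
      simp only [injA_pass2, injB_go, injB_hit, hq]
      exact ih S acc used hInv hN'
    | q0 :: q1 :: tl =>
      have hlen : ¬ (((pvSplit lnk "?").length == 1) = true) := by rw [hq]; simp
      have hquery : pvQuery lnk = pvSplit q1 "&" := by
        simp [pvQuery, hq, PySem.List.pyGet?, PySem.List.pyIdx?]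
      have hNl : ∀ par ∈ pvQuery lnk, pvFirst par ∈ allN :=
        hN lnk (by simp) (by simp [hq])
      have h := inner_eq (pvQuery lnk) lnk S acc used allN ⟨hInv.1, hInv.2⟩ hNl
      have hlen2 : ¬ (((q0 :: q1 :: tl).length == 1) = true) := by simp
      simp only [injA_pass2, injB_go, injB_hit, hq]
      rw [if_neg hlen2, ← hquery]
      match hfind : injB_find lnk used (pvQuery lnk) with
      | none =>
        rw [h.1 hfind]
        exact ih S acc used hInv hN'
      | some (n, s) =>
        obtain ⟨heq, hinv'⟩ := h.2 n s hfind
        rw [heq]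
        simp only []
        rw [ih _ _ _ hinv' hN']
        simp

-- ===== VERDICT =====
theorem inj_links_spec : Claim_equal_inj_links := by
  intro links _
  unfold Spec_inj_links inj_links inj_links_alt
  have h := loop_eq links (PySem.Set.ofList (injA_pass1 links)) [] PySem.Set.empty
    (injA_pass1 links)
    ⟨PySem.Set.nodup_ofList _, by
      intro x
      simp [PySem.Set.mem_ofList, PySem.Set.empty]⟩
    (fun lnk hl hq par hp => mem_pass1 links lnk hl hq par hp)
  rw [h]
  rfl
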